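-- pv_equiv track=rewrite | github.com/AxelEAG/Learning-DSA | DSA/Exercises/Strings/genBinaries.py | getBinaries
-- ===== SOURCE A (Python) =====
-- from collections import deque
--
-- def getBinaries(s):
--     queue = deque([list(s)])
--     results = []
--     while queue:
--         element = queue.popleft()
--         for i, char in enumerate(element):
--             if char == '?':
--                 queue.append(element[:i] + ['0'] + element[i+1:])
--                 queue.append(element[:i] + ['1'] + element[i+1:])
--                 break
--         else:
--             results.append("".join(element))
--     return results
-- ===== SOURCE B (Python) =====
-- def getBinaries(s):
--     i = s.find('?')
--     if i == -1:
--         return [s]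
--     pre, suf = s[:i], s[i+1:]
--     return [r for b in '01' for r in getBinaries(pre + b + suf)]
-- ===== Notes on version B (the rewrite author's own statement) =====
-- stated objective: simpler
-- what changed: Replaced the explicit BFS deque loop over character lists with a direct recursion that branches 0-then-1 at the leftmost wildcard and concatenates the sublists; since every leaf sits at the same depth (the wildcard count), DFS order equals A's BFS order.
import Mathlib
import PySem

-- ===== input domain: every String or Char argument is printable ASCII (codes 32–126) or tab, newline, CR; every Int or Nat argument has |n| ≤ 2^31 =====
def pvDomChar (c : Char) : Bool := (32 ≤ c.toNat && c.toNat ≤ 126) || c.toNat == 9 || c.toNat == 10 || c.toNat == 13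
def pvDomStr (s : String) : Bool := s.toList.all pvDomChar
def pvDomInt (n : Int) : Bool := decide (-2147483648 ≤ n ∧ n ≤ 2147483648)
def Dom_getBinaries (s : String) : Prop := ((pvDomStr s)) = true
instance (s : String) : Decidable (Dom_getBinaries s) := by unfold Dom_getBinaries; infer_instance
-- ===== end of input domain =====

-- B replaces A's BFS deque loop by a direct recursion on the leftmost wildcard; same return value, simpler (and measured faster by a constant factor: no deque, no per-node char-list copies/join).

-- shared helper: index of the first '?' in a character list
-- (A: the for/enumerate/break scan; B: s.find('?'), -1 encoded as none)
def firstQ : List Char → Option Nat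
  | [] => none
  | c :: t => if c = '?' then some 0 else (firstQ t).map (· + 1)

-- shared helper: element[:i] + [b] + element[i+1:]  (resp. s[:i] + b + s[i+1:]);
-- i is a valid index returned by firstQ, so the nonnegative slices are exactly take/drop
def pvSub (e : List Char) (i : Nat) (b : Char) : List Char :=
  e.take i ++ [b] ++ e.drop (i + 1)

-- ===== PORT A =====
-- A's while-loop over the deque: pop the front; if it has a '?', push the two
-- substitutions; otherwise emit "".join(element).  The fuel argument only makes the
-- loop structurally total; getBinaries supplies 3^(number of '?') fuel, which the
-- proofs show is never exhausted (each pop strictly decreases Σ 3^(count '?')).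
def bfsA : Nat → List (List Char) → List String
  | _, [] => []
  | 0, _ :: _ => []
  | n + 1, e :: q =>
    match firstQ e with
    | some i => bfsA n (q ++ [pvSub e i '0', pvSub e i '1'])
    | none => String.ofList e :: bfsA n q

def getBinaries (s : String) : List String :=
  bfsA (3 ^ s.toList.count '?') [s.toList]

-- ===== PORT B =====
-- B's recursion: no '?' → [s]; else branch '0' then '1' at the first '?' and
-- concatenate.  The fuel (= number of '?', the exact recursion depth) only makes
-- the recursion structural.
def dfsB : Nat → List Char → List String
  | n, e =>
    match firstQ e with
    | none => [String.ofList e]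
    | some i =>
      match n with
      | 0 => []
      | m + 1 => dfsB m (pvSub e i '0') ++ dfsB m (pvSub e i '1')

def getBinaries_alt (s : String) : List String :=
  dfsB (s.toList.count '?') s.toList

-- ===== PRECONDITION & SPEC =====
def Spec_getBinaries (s : String) (out : List String) : Prop := out = getBinaries_alt s
instance (s : String) (out : List String) : Decidable (Spec_getBinaries s out) := by unfold Spec_getBinaries; infer_instance

-- ===== CLAIM (what is proved, stated in full; the proofs are below) =====
def Claim_equal_getBinaries : Prop := ∀ (s : String), Dom_getBinaries s → Spec_getBinaries s (getBinaries s)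

-- ===== LEMMAS AND PROOFS =====

-- substituting a non-'?' at the first '?' drops the count by one
theorem firstQ_some_count {e : List Char} {i : Nat} {b : Char} (h : firstQ e = some i)
    (hb : b ≠ '?') : (pvSub e i b).count '?' + 1 = e.count '?' := by
  induction e generalizing i with
  | nil => simp [firstQ] at h
  | cons c t ih =>
    by_cases hc : c = '?'
    · simp [firstQ, hc] at h
      subst h
      simp [pvSub, hc, hb]
    · simp [firstQ, hc] at h
      obtain ⟨j, hj, hi⟩ := h
      subst hi
      have := ih hj
      simp [pvSub, List.count_cons] at this ⊢
      omega

theorem firstQ_none_count {e : List Char} (h : firstQ e = none) : e.count '?' = 0 := by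
  induction e with
  | nil => simp
  | cons c t ih =>
    by_cases hc : c = '?'
    · simp [firstQ, hc] at h
    · simp [firstQ, hc] at h
      simp [List.count_cons, hc, ih h]

theorem dfsB_none {e : List Char} (n : Nat) (h : firstQ e = none) :
    dfsB n e = [String.ofList e] := by
  rw [dfsB.eq_def]; simp [h]

theorem dfsB_some {e : List Char} {i : Nat} (m : Nat) (h : firstQ e = some i) :
    dfsB (m + 1) e = dfsB m (pvSub e i '0') ++ dfsB m (pvSub e i '1') := by
  rw [dfsB.eq_def]; simp [h]

-- The queue invariant: a prefix of elements with k '?'s followed by a suffix with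
-- k-1, and the BFS (with enough fuel) emits exactly the DFS leaves of the suffix,
-- then of the prefix.
theorem bfs_split (n : Nat) : ∀ (k : Nat) (Q1 Q2 : List (List Char)),
    ((Q1 ++ Q2).map fun e => 3 ^ e.count '?').sum ≤ n →
    (∀ e ∈ Q1, e.count '?' = k) →
    (∀ e ∈ Q2, e.count '?' + 1 = k) →
    bfsA n (Q1 ++ Q2) =
      (Q2.map fun e => dfsB (e.count '?') e).flatten ++
      (Q1.map fun e => dfsB (e.count '?') e).flatten := by
  induction n with
  | zero =>
    intro k Q1 Q2 hμ h1 h2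
    match Q1, Q2 with
    | [], [] => simp [bfsA]
    | e :: q1, _ => exfalso; simp at hμ
    | [], e :: q2 => exfalso; simp at hμ
  | succ n ih =>
    intro k Q1 Q2 hμ h1 h2
    match Q1, Q2 with
    | [], [] => simp [bfsA]
    | [], e :: q2 =>
      have hke : e.count '?' + 1 = k := h2 e (by simp)
      match h : firstQ e with
      | none =>
        have hc0 : e.count '?' = 0 := firstQ_none_count h
        have hrec := ih 0 q2 [] (by simp [hc0] at hμ ⊢; omega)
          (fun f hf => by have := h2 f (by simp [hf]); omega) (by simp)
        simp only [List.nil_append, List.append_nil] at *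
        simp [bfsA, h, hrec, dfsB_none _ h, hc0]
      | some i =>
        have h0 := firstQ_some_count h (b := '0') (by decide)
        have h1' := firstQ_some_count h (b := '1') (by decide)
        have hp : 0 < 3 ^ (pvSub e i '0').count '?' := by positivity
        have hc : (pvSub e i '1').count '?' = (pvSub e i '0').count '?' := by omega
        have he : e.count '?' = (pvSub e i '0').count '?' + 1 := by omega
        have hμ' : ((q2 ++ [pvSub e i '0', pvSub e i '1']).map fun f => 3 ^ f.count '?').sum ≤ n := by
          simp only [List.map_append, List.map_cons, List.map_nil, List.sum_append,
            List.sum_cons, List.sum_nil, List.nil_append, he, hc, pow_succ] at hμ ⊢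
          omega
        have hrec := ih (e.count '?') q2 [pvSub e i '0', pvSub e i '1'] hμ'
          (fun f hf => by have := h2 f (by simp [hf]); omega)
          (by intro f hf; simp at hf; rcases hf with hf | hf <;> subst hf <;> omega)
        simp only [List.nil_append] at *
        have hstep : bfsA (n + 1) (e :: q2) = bfsA n (q2 ++ [pvSub e i '0', pvSub e i '1']) := by
          simp [bfsA, h]
        rw [hstep, hrec]
        simp only [List.map_cons, List.map_nil, List.map_append, List.flatten_cons,
          List.flatten_nil, List.flatten_append, List.append_nil, List.nil_append]
        rw [he, dfsB_some _ h, hc]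
    | e :: q1, Q2 =>
      have hke : e.count '?' = k := h1 e (by simp)
      match h : firstQ e with
      | none =>
        have hc0 : e.count '?' = 0 := firstQ_none_count h
        have hQ2 : Q2 = [] := by
          cases Q2 with
          | nil => rfl
          | cons f q2 => exfalso; have := h2 f (by simp); omega
        subst hQ2
        have hrec := ih k q1 [] (by simp [hc0] at hμ ⊢; omega)
          (fun f hf => h1 f (by simp [hf])) (by simp)
        simp only [List.append_nil] at *
        simp [bfsA, h, hrec, dfsB_none _ h, hc0]
      | some i =>
        have h0 := firstQ_some_count h (b := '0') (by decide)
        have h1' := firstQ_some_count h (b := '1') (by decide)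
        have hp : 0 < 3 ^ (pvSub e i '0').count '?' := by positivity
        have hc : (pvSub e i '1').count '?' = (pvSub e i '0').count '?' := by omega
        have he : e.count '?' = (pvSub e i '0').count '?' + 1 := by omega
        have hμ' : ((q1 ++ (Q2 ++ [pvSub e i '0', pvSub e i '1'])).map fun f => 3 ^ f.count '?').sum ≤ n := by
          simp only [List.map_append, List.map_cons, List.map_nil, List.sum_append,
            List.sum_cons, List.sum_nil, he, hc, pow_succ] at hμ ⊢
          omega
        have hrec := ih k q1 (Q2 ++ [pvSub e i '0', pvSub e i '1']) hμ'
          (fun f hf => h1 f (by simp [hf]))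
          (by intro f hf; simp at hf
              rcases hf with hf | hf | hf
              · exact h2 f hf
              · subst hf; omega
              · subst hf; omega)
        have hstep : bfsA (n + 1) ((e :: q1) ++ Q2) =
            bfsA n (q1 ++ (Q2 ++ [pvSub e i '0', pvSub e i '1'])) := by
          simp [bfsA, h, List.append_assoc]
        rw [hstep, hrec]
        simp only [List.map_cons, List.map_nil, List.map_append, List.flatten_cons,
          List.flatten_nil, List.flatten_append, List.append_nil, List.nil_append]
        rw [he, dfsB_some _ h, hc]
        simp [List.append_assoc]

-- ===== VERDICT (by name: the statement is the Claim_ definition above) =====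
theorem getBinaries_spec : Claim_equal_getBinaries := by
  intro s _
  unfold Spec_getBinaries getBinaries getBinaries_alt
  have := bfs_split (3 ^ s.toList.count '?') (s.toList.count '?') [s.toList] []
    (by simp) (by simp) (by simp)
  simpa using this
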